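-- pv_equiv track=rewrite | github.com/Abdallah-Medhat/AI-For-Cyber-Security | Detection of data exfiltration via DNS/src/features/build_features.py | labels_max
-- ===== SOURCE A (Python) =====
-- def labels_max(record_domain):
--     len_labels=[]
--     labels=record_domain.split('.')
--     for i in labels:
--         len_labels.append(len(i))
--     max_len=max(len_labels)
--     max_index=len_labels.index(max_len)
--     return(len_labels[max_index])
-- ===== SOURCE B (Python) =====
-- def labels_max(record_domain):
--     best = 0
--     current = 0
--     for ch in record_domain:
--         if ch == '.':
--             current = 0
--         else:
--             current += 1
--             best = max(best, current)
--     return best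
-- ===== Notes on version B (the rewrite author's own statement) =====
-- stated objective: simpler
-- what changed: Replaces splitting the domain into labels plus a lengths list, max() and index()/subscript lookup with a single character scan maintaining (best, current) run lengths and no intermediate lists.
import Mathlib
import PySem

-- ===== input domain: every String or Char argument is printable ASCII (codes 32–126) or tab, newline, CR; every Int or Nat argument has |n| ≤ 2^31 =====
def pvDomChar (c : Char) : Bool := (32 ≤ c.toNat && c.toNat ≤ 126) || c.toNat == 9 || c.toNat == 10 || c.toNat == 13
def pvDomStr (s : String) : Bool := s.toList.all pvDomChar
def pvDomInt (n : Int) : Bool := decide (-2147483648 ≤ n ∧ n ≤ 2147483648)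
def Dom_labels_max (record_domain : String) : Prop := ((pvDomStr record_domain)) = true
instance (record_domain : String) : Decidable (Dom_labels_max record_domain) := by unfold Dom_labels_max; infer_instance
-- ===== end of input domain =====

-- B replaces split-then-max-then-index with a single character scan keeping (best, current) run lengths; objective: simpler one-pass without intermediate lists.


-- ===== PORT A =====
-- split('.') → PySem.Chars.splitOn on the char list; the `none` branches are unreachable
-- (split('.') always returns a nonempty list, so Python's max/index/[] never raise).
def labels_max (record_domain : String) : Int :=
  let labels := PySem.Chars.splitOn record_domain.toList ['.']
  let len_labels : List Int := labels.foldl (fun acc i => acc ++ [(PySem.Chars.len i : Int)]) []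
  match PySem.List.max? len_labels (fun y => y) with
  | none => 0
  | some max_len =>
    match PySem.List.index? len_labels max_len with
    | none => 0
    | some max_index => (PySem.List.pyGet? len_labels ((max_index : Nat) : Int)).getD 0

-- ===== PORT B =====
def labels_max_alt (record_domain : String) : Int :=
  (record_domain.toList.foldl
    (fun (p : Int × Int) c =>
      if c = '.' then (p.1, 0) else (max p.1 (p.2 + 1), p.2 + 1))
    (0, 0)).1

-- ===== PRECONDITION & SPEC =====
def Spec_labels_max (record_domain : String) (out : Int) : Prop := out = labels_max_alt record_domain
instance (record_domain : String) (out : Int) : Decidable (Spec_labels_max record_domain out) := by unfold Spec_labels_max; infer_instance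

-- ===== CLAIM (what is proved, stated in full; the proofs are below) =====
def Claim_equal_labels_max : Prop := ∀ (record_domain : String), Dom_labels_max record_domain → Spec_labels_max record_domain (labels_max record_domain)

-- ===== LEMMAS AND PROOFS =====

-- reference splitter: cur is the reversed current label
def mySplit : List Char → List Char → List (List Char)
  | [], cur => [cur.reverse]
  | c :: rest, cur => if c = '.' then cur.reverse :: mySplit rest [] else mySplit rest (c :: cur)

-- running max of label lengths
def F (ls : List (List Char)) (b : Int) : Int :=
  ls.foldl (fun a x => max a (x.length : Int)) b

lemma go_cons (f : Nat) (c : Char) (rest cur : List Char) (acc : List (List Char)) :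
    PySem.Chars.splitOn.go ['.'] (f + 1) (c :: rest) cur acc =
      (if c = '.' then PySem.Chars.splitOn.go ['.'] f rest [] (cur.reverse :: acc)
       else PySem.Chars.splitOn.go ['.'] f rest (c :: cur) acc) := by
  rw [PySem.Chars.splitOn.go]
  by_cases h : c = '.'
  · subst h; simp [List.isPrefixOf]
  · have hcond : (['.'].isPrefixOf (c :: rest)) = false := by
      simp only [List.isPrefixOf, Bool.and_true, beq_eq_false_iff_ne, ne_eq]
      exact fun hh => h hh.symm
    simp [hcond, h]

lemma go_nil (f : Nat) (cur : List Char) (acc : List (List Char)) :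
    PySem.Chars.splitOn.go ['.'] (f + 1) [] cur acc = (cur.reverse :: acc).reverse := by
  rw [PySem.Chars.splitOn.go]
  omega

lemma go_eq : ∀ (f : Nat) (l cur : List Char) (acc : List (List Char)), l.length < f →
    PySem.Chars.splitOn.go ['.'] f l cur acc = acc.reverse ++ mySplit l cur := by
  intro f
  induction f with
  | zero => intro l cur acc h; omega
  | succ f ih =>
    intro l cur acc h
    cases l with
    | nil => simp [go_nil, mySplit]
    | cons c rest =>
      rw [go_cons]
      by_cases hc : c = '.'
      · simp only [hc, mySplit, if_pos]
        simp [ih rest [] (cur.reverse :: acc) (by simpa using Nat.lt_of_succ_lt_succ h)]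
      · simp only [if_neg hc, mySplit]
        rw [ih rest (c :: cur) acc (by simpa using Nat.lt_of_succ_lt_succ h)]

lemma splitOn_eq_mySplit (cs : List Char) :
    PySem.Chars.splitOn cs ['.'] = mySplit cs [] := by
  unfold PySem.Chars.splitOn
  rw [go_eq (cs.length + 1) cs [] [] (by omega)]
  simp

lemma mySplit_ne_nil : ∀ (cs acc : List Char), mySplit cs acc ≠ [] := by
  intro cs
  induction cs with
  | nil => intro acc; simp [mySplit]
  | cons c rest ih =>
    intro acc
    by_cases hc : c = '.'
    · simp [mySplit, hc]
    · simp only [mySplit, if_neg hc]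
      exact ih _

lemma F_max : ∀ (ls : List (List Char)) (b k : Int), F ls (max b k) = max k (F ls b) := by
  intro ls
  induction ls with
  | nil => intro b k; simp [F, max_comm]
  | cons x ls ih =>
    intro b k
    simp only [F, List.foldl_cons] at *
    rw [show max (max b k) (x.length : Int) = max (max b (x.length : Int)) k by
          rw [max_right_comm], ih]

lemma F_ge_acc : ∀ (cs acc : List Char) (b : Int), (acc.length : Int) ≤ F (mySplit cs acc) b := by
  intro cs
  induction cs with
  | nil => intro acc b; simp [mySplit, F]
  | cons c rest ih =>
    intro acc b
    by_cases hc : c = '.'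
    · simp only [mySplit, if_pos hc, F, List.foldl_cons]
      have := F_max (mySplit rest []) b (acc.reverse.length : Int)
      simp only [F] at this
      simp only [List.length_reverse] at this ⊢
      rw [show (max b (acc.length : Int)) = max b (acc.length : Int) from rfl] at this
      calc (acc.length : Int) ≤ max (acc.length : Int) (F (mySplit rest []) b) := le_max_left _ _
        _ = _ := by rw [← F_max]; simp [F]
    · simp only [mySplit, if_neg hc]
      have h := ih (c :: acc) b
      simp only [List.length_cons] at h
      have : (acc.length : Int) ≤ ((acc.length + 1 : Nat) : Int) := by push_cast; omega
      exact le_trans this h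

lemma scan_eq : ∀ (cs acc : List Char) (best : Int), (acc.length : Int) ≤ best →
    (cs.foldl (fun (p : Int × Int) c =>
        if c = '.' then (p.1, 0) else (max p.1 (p.2 + 1), p.2 + 1))
      (best, (acc.length : Int))).1 = F (mySplit cs acc) best := by
  intro cs
  induction cs with
  | nil =>
    intro acc best h
    simp [mySplit, F, max_eq_left h]
  | cons c rest ih =>
    intro acc best h
    by_cases hc : c = '.'
    · simp only [List.foldl_cons, if_pos hc, mySplit]
      have hb : (0 : Int) ≤ best := le_trans (by positivity) h
      have := ih [] best (by simp only [List.length_nil, Nat.cast_zero]; exact hb)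
      simp only [List.length_nil, Nat.cast_zero] at this
      rw [this]
      simp only [F, List.foldl_cons, List.length_reverse, max_eq_left h]
    · simp only [List.foldl_cons, if_neg hc, mySplit]
      have hlen : ((acc.length : Int) + 1) = (((c :: acc).length : Nat) : Int) := by
        simp [List.length_cons]
      have hle : (((c :: acc).length : Nat) : Int) ≤ max best ((acc.length : Int) + 1) := by
        rw [← hlen]; exact le_max_right _ _
      have hstep := ih (c :: acc) (max best ((acc.length : Int) + 1)) hle
      rw [hlen] at hstep
      rw [hlen, hstep, F_max]
      exact max_eq_right (F_ge_acc rest (c :: acc) best)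

lemma foldl_append_map (l : List (List Char)) (a : List Int) :
    l.foldl (fun acc i => acc ++ [(PySem.Chars.len i : Int)]) a
      = a ++ l.map (fun i => (i.length : Int)) := by
  induction l generalizing a with
  | nil => simp
  | cons x l ih =>
    simp only [List.foldl_cons, List.map_cons]
    rw [ih]
    simp [PySem.Chars.len_eq]

lemma F_eq_foldl_map (ls : List (List Char)) (b : Int) :
    (ls.map (fun i => (i.length : Int))).foldl max b = F ls b := by
  simp [F, List.foldl_map]

-- ===== VERDICT (by name: the statement is the Claim_ definition above) =====
theorem labels_max_spec : Claim_equal_labels_max := by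
  intro s _
  unfold Spec_labels_max labels_max labels_max_alt
  rw [splitOn_eq_mySplit]
  simp only [foldl_append_map, List.nil_append]
  obtain ⟨hd, tl, hsplit⟩ : ∃ hd tl, mySplit s.toList [] = hd :: tl := by
    cases h : mySplit s.toList [] with
    | nil => exact absurd h (mySplit_ne_nil _ _)
    | cons hd tl => exact ⟨hd, tl, rfl⟩
  rw [hsplit]
  simp only [List.map_cons]
  rw [PySem.List.max?_id_cons]
  set m := ((tl.map (fun i => (i.length : Int))).foldl max (hd.length : Int)) with hm
  have hmem : m ∈ (hd.length : Int) :: tl.map (fun i => (i.length : Int)) := by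
    have := PySem.List.max?_mem (xs := (hd.length : Int) :: tl.map (fun i => (i.length : Int)))
      (key := fun y => y) (m := m) (by rw [PySem.List.max?_id_cons])
    exact this
  have hidx : ∃ k, PySem.List.index? ((hd.length : Int) :: tl.map (fun i => (i.length : Int))) m = some k := by
    have := (PySem.List.index?_isSome_iff (xs := (hd.length : Int) :: tl.map (fun i => (i.length : Int))) (v := m)).mpr hmem
    exact Option.isSome_iff_exists.mp this
  obtain ⟨k, hk⟩ := hidx
  simp only [hk]
  obtain ⟨hklt, hget, -⟩ := PySem.List.getElem_of_index?_eq_some hk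
  rw [PySem.List.pyGet?_natCast]
  rw [List.getElem?_eq_getElem hklt]
  simp only [Option.getD_some, hget]
  -- m = B's scan result
  have hscan := scan_eq s.toList [] 0 (by simp)
  simp only [List.length_nil, Nat.cast_zero] at hscan
  rw [hscan, hsplit]
  simp only [F, List.foldl_cons]
  rw [max_eq_right (by positivity : (0 : Int) ≤ (hd.length : Int))]
  rw [hm, F_eq_foldl_map]
  simp [F]
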